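-- pv_equiv track=rewrite | github.com/Jhoelperaltap/helpdeskv3 | scripts/prueba.py | analizar_coocurrencias
-- ===== SOURCE A (Python) =====
-- from collections import Counter, defaultdict
-- from collections import Counter, defaultdict
-- from collections import Counter, defaultdict
--
-- def analizar_coocurrencias(resultados):
--     """Cuenta con qu칠 n칰meros suele salir cada n칰mero."""
--     coocurrencias = defaultdict(Counter)
--     for jugada in resultados:
--         for num in jugada[:-1]:
--             for otro in jugada[:-1]:
--                 if num != otro:
--                     coocurrencias[num][otro] += 1
--     return coocurrencias
-- ===== SOURCE B (Python) =====
-- from collections import Counter, defaultdict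
--
-- def analizar_coocurrencias(resultados):
--     """Cuenta con que numeros suele salir cada numero (dos fases: aportes planos, luego suma)."""
--     aportes = [
--         (a, b, ca * cb)
--         for jugada in resultados
--         for cnt in [Counter(jugada[:-1])]
--         for a, ca in cnt.items()
--         for b, cb in cnt.items()
--         if a != b
--     ]
--     coocurrencias = defaultdict(Counter)
--     for a, b, w in aportes:
--         coocurrencias[a][b] += w
--     return coocurrencias
-- ===== Notes on version B (the rewrite author's own statement) =====
-- stated objective: alternative
-- what changed: B is a two-phase pipeline: it first flattens the input into one list of weighted contribution triples (a, b, cnt[a]*cnt[b]) built from a per-play frequency table Counter(jugada[:-1]) over ordered pairs of distinct values, then sums that flat list into the dict in a single loop; A instead does in-place +=1 updates inside a triple-nested loop over element occurrences.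
import Mathlib
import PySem

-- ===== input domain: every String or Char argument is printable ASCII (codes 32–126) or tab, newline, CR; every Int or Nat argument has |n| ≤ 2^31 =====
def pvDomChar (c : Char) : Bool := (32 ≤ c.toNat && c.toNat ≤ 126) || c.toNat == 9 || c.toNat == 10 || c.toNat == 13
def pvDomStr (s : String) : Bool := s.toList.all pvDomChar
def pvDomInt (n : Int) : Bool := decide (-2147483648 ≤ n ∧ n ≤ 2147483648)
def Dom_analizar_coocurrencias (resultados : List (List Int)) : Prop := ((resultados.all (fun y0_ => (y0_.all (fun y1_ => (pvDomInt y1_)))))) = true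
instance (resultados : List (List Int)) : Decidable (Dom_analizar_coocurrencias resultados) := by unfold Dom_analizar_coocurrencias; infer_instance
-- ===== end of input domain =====

-- B is a two-phase pipeline — flatten all per-play weighted contribution triples
-- (a, b, cnt[a]*cnt[b]) built from a Counter over distinct values, then sum the flat
-- list into the dict in one loop — instead of A's triple-nested occurrence loop
-- (objective: alternative algorithm; same result, including insertion order).

-- ===== PORT A =====
def analizar_coocurrencias (resultados : List (List Int)) : List (Int × List (Int × Int)) :=
  let cooc : PySem.Dict Int (PySem.Dict Int Int) :=
    resultados.foldl (fun cooc jugada =>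
      (PySem.List.slice jugada none (some (-1))).foldl (fun cooc num =>
        (PySem.List.slice jugada none (some (-1))).foldl (fun cooc otro =>
          if num ≠ otro then
            -- coocurrencias[num][otro] += 1  (defaultdict(Counter): missing outer key ↦ empty Counter, missing inner key ↦ 0)
            cooc.modify num PySem.Dict.empty (fun cnt => cnt.modify otro 0 (· + 1))
          else cooc) cooc) cooc) PySem.Dict.empty
  cooc.items.map (fun p => (p.1, p.2.items))

-- ===== PORT B =====
-- phase 1: the flat list of weighted contribution triples (a, b, ca*cb), one per
-- ordered pair of distinct values of a play's frequency table (the comprehension in Source B)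
def pvAportes (resultados : List (List Int)) : List (Int × Int × Int) :=
  resultados.flatMap (fun jugada =>
    let cnt := PySem.Dict.counter (PySem.List.slice jugada none (some (-1)))
    cnt.items.flatMap (fun pa =>
      (cnt.items.filter (fun pb => pa.1 != pb.1)).map (fun pb => (pa.1, pb.1, pa.2 * pb.2))))

-- phase 2: one flat summing loop over the triples
def analizar_coocurrencias_alt (resultados : List (List Int)) : List (Int × List (Int × Int)) :=
  let cooc : PySem.Dict Int (PySem.Dict Int Int) :=
    (pvAportes resultados).foldl (fun cooc t =>
      cooc.modify t.1 PySem.Dict.empty (fun c => c.modify t.2.1 0 (· + t.2.2))) PySem.Dict.empty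
  cooc.items.map (fun p => (p.1, p.2.items))

-- ===== PRECONDITION & SPEC =====
def Spec_analizar_coocurrencias (resultados : List (List Int)) (out : List (Int × List (Int × Int))) : Prop := out = analizar_coocurrencias_alt resultados
instance (resultados : List (List Int)) (out : List (Int × List (Int × Int))) : Decidable (Spec_analizar_coocurrencias resultados out) := by unfold Spec_analizar_coocurrencias; infer_instance

-- ===== CLAIM (what is proved, stated in full; the proofs are below) =====
def Claim_equal_analizar_coocurrencias : Prop := ∀ (resultados : List (List Int)), Dom_analizar_coocurrencias resultados → Spec_analizar_coocurrencias resultados (analizar_coocurrencias resultados)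

-- ===== LEMMAS AND PROOFS =====

-- The co-occurrence state and the elementary update "cooc[a][b] += k".
def pvInc (s : PySem.Dict Int (PySem.Dict Int Int)) (a b k : Int) : PySem.Dict Int (PySem.Dict Int Int) :=
  s.modify a PySem.Dict.empty (fun c => c.modify b 0 (· + k))

-- Guarded update: A's loop body and B's generated triples are `pvIncG` with suitable weights.
def pvIncG (s : PySem.Dict Int (PySem.Dict Int Int)) (a b k : Int) : PySem.Dict Int (PySem.Dict Int Int) :=
  if a = b then s else pvInc s a b k

-- "The pair (a,b) already has an entry": updates to it are in-place and commute with others.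
def pvPP (s : PySem.Dict Int (PySem.Dict Int Int)) (a b : Int) : Prop :=
  ∃ c, s.get? a = some c ∧ c.contains b = true

def pvP1 (s : PySem.Dict Int (PySem.Dict Int Int)) (a b : Int) : Prop := a = b ∨ pvPP s a b

-- First-occurrence dedup (the key order of Python's Counter/set).
def pvDedup : List Int → List Int
  | [] => []
  | x :: t => x :: (pvDedup t).filter (fun y => y != x)

lemma pv_insert_comm {κ ν : Type} [BEq κ] [LawfulBEq κ] (d : PySem.Dict κ ν) (k k' : κ) (v v' : ν)
    (h : d.contains k = true) (hne : k ≠ k') :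
    (d.insert k' v').insert k v = (d.insert k v).insert k' v' := by
  apply PySem.Dict.ext
  by_cases hc' : d.contains k' = true
  · rw [PySem.Dict.items_insert (d.insert k' v') k v,
        PySem.Dict.items_insert (d.insert k v) k' v',
        PySem.Dict.contains_insert, PySem.Dict.contains_insert,
        PySem.Dict.items_insert d, PySem.Dict.items_insert d, if_pos hc', if_pos h]
    simp only [h, hc', Bool.or_true, if_pos, List.map_map]
    apply List.map_congr_left
    intro p _
    by_cases hk : p.1 = k
    · simp [hk, hne, Ne.symm hne]
    · by_cases hk' : p.1 = k'
      · simp [hk', hne, Ne.symm hne, hk]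
      · simp [hk, hk']
  · rw [PySem.Dict.items_insert (d.insert k' v') k v,
        PySem.Dict.items_insert (d.insert k v) k' v',
        PySem.Dict.contains_insert, PySem.Dict.contains_insert,
        PySem.Dict.items_insert d, PySem.Dict.items_insert d, if_neg hc', if_pos h]
    have h1 : (k == k' || d.contains k) = true := by simp [h]
    have h2 : (k' == k || d.contains k') = false := by simp [hne.symm, hc']
    simp only [h1, h2, if_pos, if_neg, Bool.false_eq_true, if_false, List.map_append]
    simp [Ne.symm hne, hne]

lemma pvInc_merge (s : PySem.Dict Int (PySem.Dict Int Int)) (a b m n : Int) :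
    pvInc (pvInc s a b m) a b n = pvInc s a b (m + n) := by
  simp only [pvInc, PySem.Dict.modify, PySem.Dict.getD_insert_self, PySem.Dict.insert_insert_self]
  congr 1
  ring

lemma pvPP_new (s : PySem.Dict Int (PySem.Dict Int Int)) (a b k : Int) : pvPP (pvInc s a b k) a b := by
  refine ⟨(s.getD a PySem.Dict.empty).modify b 0 (· + k), ?_, ?_⟩
  · simp [pvInc, PySem.Dict.modify, PySem.Dict.get?_insert_self]
  · simp [PySem.Dict.contains_modify]

lemma pvPP_pres (s : PySem.Dict Int (PySem.Dict Int Int)) (a b a' b' k : Int) (h : pvPP s a b) :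
    pvPP (pvInc s a' b' k) a b := by
  obtain ⟨c, hc, hb⟩ := h
  by_cases ha : a = a'
  · subst ha
    refine ⟨(s.getD a PySem.Dict.empty).modify b' 0 (· + k), ?_, ?_⟩
    · simp [pvInc, PySem.Dict.modify, PySem.Dict.get?_insert_self]
    · rw [PySem.Dict.getD_of_get?_eq_some _ PySem.Dict.empty hc]
      simp [PySem.Dict.contains_modify, hb]
  · exact ⟨c, by rw [pvInc, PySem.Dict.modify, PySem.Dict.get?_insert_of_ne _ _ ha]; exact hc, hb⟩

lemma pvInc_comm (s : PySem.Dict Int (PySem.Dict Int Int)) (a b a' b' m n : Int) (h : pvPP s a b) :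
    pvInc (pvInc s a' b' n) a b m = pvInc (pvInc s a b m) a' b' n := by
  obtain ⟨c, hc, hb⟩ := h
  have hgd : s.getD a PySem.Dict.empty = c := PySem.Dict.getD_of_get?_eq_some _ _ hc
  have hcontains : s.contains a = true := by rw [PySem.Dict.contains_eq_isSome_get?, hc]; rfl
  by_cases ha : a = a'
  · subst ha
    by_cases hbb : b = b'
    · subst hbb; rw [pvInc_merge, pvInc_merge]; congr 1; ring
    · -- same outer key, distinct inner keys
      simp only [pvInc, PySem.Dict.modify, PySem.Dict.getD_insert_self, PySem.Dict.insert_insert_self, hgd]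
      congr 1
      rw [PySem.Dict.getD_insert_of_ne _ _ _ hbb, PySem.Dict.getD_insert_of_ne _ _ _ (Ne.symm hbb)]
      have hcb : c.contains b = true := hb
      exact pv_insert_comm c b b' _ _ hcb hbb
  · -- distinct outer keys
    simp only [pvInc, PySem.Dict.modify]
    rw [PySem.Dict.getD_insert_of_ne _ _ _ ha, PySem.Dict.getD_insert_of_ne _ _ _ (Ne.symm ha)]
    exact pv_insert_comm s a a' _ _ hcontains ha


lemma pv_add_foldl : ∀ (t : List Int) (acc : List Int),
    t.foldl PySem.Set.add acc = acc ++ (pvDedup t).filter (fun y => !acc.contains y) := by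
  intro t
  induction t with
  | nil => intro acc; simp [pvDedup]
  | cons x r ih =>
    intro acc
    simp only [List.foldl_cons, ih (PySem.Set.add acc x), pvDedup]
    by_cases hc : x ∈ acc
    · have hadd : PySem.Set.add acc x = acc := by
        simp [PySem.Set.add, PySem.Set.contains, hc]
      rw [hadd]
      simp only [List.filter_cons]
      have hx : (!acc.contains x) = false := by simp [hc]
      rw [hx]
      simp only [Bool.false_eq_true, if_false, List.filter_filter]
      congr 1
      apply List.filter_congr
      intro y _
      by_cases hy : y ∈ acc
      · simp [hy]
      · have hyx : y ≠ x := fun hh => hy (hh ▸ hc)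
        simp [hy, hyx]
    · have hadd : PySem.Set.add acc x = acc ++ [x] := by
        simp [PySem.Set.add, PySem.Set.contains, hc]
      rw [hadd]
      simp only [List.filter_cons]
      have hx : (!acc.contains x) = true := by simp [hc]
      rw [hx]
      simp only [if_true, List.append_assoc, List.singleton_append]
      congr 2
      rw [List.filter_filter]
      apply List.filter_congr
      intro y _
      by_cases hyx : y = x
      · simp [hyx]
      · by_cases hy : y ∈ acc <;> simp [hy, hyx]

lemma pv_ofList_eq (t : List Int) : PySem.Set.ofList t = pvDedup t := by
  rw [PySem.Set.ofList_eq_foldl, pv_add_foldl]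
  simp

lemma pv_nodup_dedup (t : List Int) : (pvDedup t).Nodup := by
  rw [← pv_ofList_eq]; exact PySem.Set.nodup_ofList t

lemma pv_mem_dedup (t : List Int) (x : Int) : x ∈ pvDedup t ↔ x ∈ t := by
  rw [← pv_ofList_eq]; exact PySem.Set.mem_ofList t x

lemma pv_fold_comm_one {σ α : Type} (f : σ → α → σ) (h : σ → σ) (Q : σ → Prop)
    (Hpres : ∀ s x, Q s → Q (f s x))
    (Hcomm : ∀ s x, Q s → h (f s x) = f (h s) x) :
    ∀ (l : List α) (s : σ), Q s → l.foldl f (h s) = h (l.foldl f s) := by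
  intro l
  induction l with
  | nil => intro s _; rfl
  | cons x r ih =>
    intro s hs
    simp only [List.foldl_cons]
    rw [← Hcomm s x hs, ih (f s x) (Hpres s x hs)]

lemma pv_collapse {σ : Type} (op : σ → Int → Int → σ) (P : σ → Int → Prop)
    (H1 : ∀ s k m n, op (op s k m) k n = op s k (m + n))
    (H2 : ∀ s k k' n, P s k → P (op s k' n) k)
    (H3 : ∀ s k n, P (op s k n) k)
    (H4 : ∀ s k k' m n, P s k → op (op s k' n) k m = op (op s k m) k' n) :
    ∀ (xs : List Int) (s : σ),
      xs.foldl (fun s x => op s x 1) s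
        = (pvDedup xs).foldl (fun s x => op s x ((xs.count x : Int))) s := by
  intro xs
  induction xs with
  | nil => intro s; rfl
  | cons x t ih =>
    intro s
    simp only [List.foldl_cons, pvDedup]
    rw [ih (op s x 1)]
    by_cases hx : x ∈ t
    · -- x recurs in t: merge its counted update into the head update
      obtain ⟨l₁, l₂, hS⟩ := List.append_of_mem ((pv_mem_dedup t x).mpr hx)
      have hnd := pv_nodup_dedup t
      rw [hS] at hnd
      have hxl₁ : x ∉ l₁ := fun hmem =>
        (List.disjoint_of_nodup_append hnd) hmem List.mem_cons_self
      have hxl₂ : x ∉ l₂ := by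
        have h2 := (List.nodup_append.mp hnd).2.1
        exact (List.nodup_cons.mp h2).1
      have hfil : (pvDedup t).filter (fun y => y != x) = l₁ ++ l₂ := by
        rw [hS, List.filter_append, List.filter_cons]
        simp only [bne_self_eq_false, Bool.false_eq_true, if_false]
        rw [List.filter_eq_self.mpr, List.filter_eq_self.mpr]
        · intro y hy
          have : y ≠ x := fun hh => hxl₂ (hh ▸ hy : x ∈ l₂)
          simpa using this
        · intro y hy
          have : y ≠ x := fun hh => hxl₁ (hh ▸ hy : x ∈ l₁)
          simpa using this
      have hcx : ((x :: t).count x : Int) = 1 + (t.count x : Int) := by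
        simp [List.count_cons]; push_cast; ring
      have hw₁ : ∀ (s' : σ), ∀ y ∈ l₁, op s' y ((t.count y : Int)) = op s' y (((x :: t).count y : Int)) := by
        intro s' y hy
        have hyx : y ≠ x := fun hh => hxl₁ (hh ▸ hy : x ∈ l₁)
        simp [List.count_cons, hyx, Ne.symm hyx]
      have hw₂ : ∀ (s' : σ), ∀ y ∈ l₂, op s' y ((t.count y : Int)) = op s' y (((x :: t).count y : Int)) := by
        intro s' y hy
        have hyx : y ≠ x := fun hh => hxl₂ (hh ▸ hy : x ∈ l₂)
        simp [List.count_cons, hyx, Ne.symm hyx]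
      rw [hfil, hS, List.foldl_append, List.foldl_cons, List.foldl_append]
      rw [PySem.List.foldl_congr_mem l₁ _ (fun s' y => op s' y (((x :: t).count y : Int))) (op s x 1) hw₁]
      rw [PySem.List.foldl_congr_mem l₂ _ (fun s' y => op s' y (((x :: t).count y : Int))) _ hw₂]
      congr 1
      rw [hcx, ← H1 s x 1 ((t.count x : Int))]
      exact (pv_fold_comm_one (fun s' y => op s' y (((x :: t).count y : Int)))
        (fun s' => op s' x ((t.count x : Int))) (fun s' => P s' x)
        (fun s' y hq => H2 s' x y _ hq)
        (fun s' y hq => H4 s' x y _ _ hq)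
        l₁ (op s x 1) (H3 s x 1)).symm
    · -- x fresh: its dedup entry is new and counts of t are unchanged
      have hfil : (pvDedup t).filter (fun y => y != x) = pvDedup t := by
        apply List.filter_eq_self.mpr
        intro y hy
        have : y ≠ x := fun hh => hx (hh ▸ (pv_mem_dedup t y).mp hy : x ∈ t)
        simpa using this
      rw [hfil]
      have hcx : ((x :: t).count x : Int) = 1 := by
        simp [List.count_cons, List.count_eq_zero_of_not_mem hx]
      rw [hcx]
      apply PySem.List.foldl_congr_mem
      intro s' y hy
      have hyx : y ≠ x := fun hh => hx (hh ▸ (pv_mem_dedup t y).mp hy : x ∈ t)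
      simp [List.count_cons, hyx, Ne.symm hyx]


lemma pvIncG_merge (s : PySem.Dict Int (PySem.Dict Int Int)) (a b m n : Int) :
    pvIncG (pvIncG s a b m) a b n = pvIncG s a b (m + n) := by
  by_cases h : a = b <;> simp [pvIncG, h, pvInc_merge]

lemma pvP1_new (s : PySem.Dict Int (PySem.Dict Int Int)) (a b k : Int) : pvP1 (pvIncG s a b k) a b := by
  by_cases h : a = b
  · exact Or.inl h
  · exact Or.inr (by simpa [pvIncG, h] using pvPP_new s a b k)

lemma pvP1_pres (s : PySem.Dict Int (PySem.Dict Int Int)) (a b a' b' k : Int) (h : pvP1 s a b) :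
    pvP1 (pvIncG s a' b' k) a b := by
  rcases h with h | h
  · exact Or.inl h
  · by_cases h' : a' = b'
    · simpa [pvIncG, h'] using Or.inr h
    · exact Or.inr (by simpa [pvIncG, h'] using pvPP_pres s a b a' b' k h)

lemma pvIncG_comm (s : PySem.Dict Int (PySem.Dict Int Int)) (a b a' b' m n : Int) (h : pvP1 s a b) :
    pvIncG (pvIncG s a' b' n) a b m = pvIncG (pvIncG s a b m) a' b' n := by
  rcases h with h | h
  · simp [pvIncG, h]
  · by_cases hab : a = b
    · simp [pvIncG, hab]
    · by_cases h' : a' = b'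
      · simp [pvIncG, h']
      · simp only [pvIncG, if_neg hab, if_neg h']
        exact pvInc_comm s a b a' b' m n h

lemma pv_foldl_pres {σ α : Type} (f : σ → α → σ) (Q : σ → Prop)
    (H : ∀ s x, Q s → Q (f s x)) :
    ∀ (l : List α) (s : σ), Q s → Q (l.foldl f s) := by
  intro l
  induction l with
  | nil => intro s hs; exact hs
  | cons x r ih => intro s hs; exact ih (f s x) (H s x hs)

lemma pv_pass_merge (a : Int) : ∀ (l : List Int) (w₁ w₂ : Int → Int) (s : PySem.Dict Int (PySem.Dict Int Int)),
    l.foldl (fun s b => pvIncG s a b (w₂ b)) (l.foldl (fun s b => pvIncG s a b (w₁ b)) s)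
      = l.foldl (fun s b => pvIncG s a b (w₁ b + w₂ b)) s := by
  intro l
  induction l with
  | nil => intro w₁ w₂ s; rfl
  | cons b r ih =>
    intro w₁ w₂ s
    simp only [List.foldl_cons]
    rw [← pv_fold_comm_one (fun s y => pvIncG s a y (w₁ y)) (fun s => pvIncG s a b (w₂ b))
          (fun s => pvP1 s a b)
          (fun s y hq => pvP1_pres s a b a y (w₁ y) hq)
          (fun s y hq => pvIncG_comm s a b a y (w₂ b) (w₁ y) hq)
          r (pvIncG s a b (w₁ b)) (pvP1_new s a b (w₁ b)),
        pvIncG_merge]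
    exact ih w₁ w₂ (pvIncG s a b (w₁ b + w₂ b))

lemma pv_pass_new (a : Int) (w : Int → Int) :
    ∀ (l : List Int) (s : PySem.Dict Int (PySem.Dict Int Int)) (b : Int), b ∈ l →
      pvP1 (l.foldl (fun s b' => pvIncG s a b' (w b')) s) a b := by
  intro l
  induction l with
  | nil => intro s b hb; cases hb
  | cons b₀ r ih =>
    intro s b hb
    simp only [List.foldl_cons]
    rcases List.mem_cons.mp hb with hb | hb
    · subst hb
      exact pv_foldl_pres _ (fun s => pvP1 s a b)
        (fun s y hq => pvP1_pres s a b a y (w y) hq) r _ (pvP1_new s a b (w b))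
    · exact ih (pvIncG s a b₀ (w b₀)) b hb

lemma pv_pass_comm (S : List Int) (c : Int → Int) (a a' m n : Int) :
    ∀ (l : List Int) (s : PySem.Dict Int (PySem.Dict Int Int)), (∀ b ∈ l, pvP1 s a b) →
      l.foldl (fun s b => pvIncG s a b (m * c b)) (S.foldl (fun s b => pvIncG s a' b (n * c b)) s)
        = S.foldl (fun s b => pvIncG s a' b (n * c b)) (l.foldl (fun s b => pvIncG s a b (m * c b)) s) := by
  intro l
  induction l with
  | nil => intro s _; rfl
  | cons b r ih =>
    intro s h
    simp only [List.foldl_cons]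
    rw [← pv_fold_comm_one (fun s y => pvIncG s a' y (n * c y)) (fun s => pvIncG s a b (m * c b))
          (fun s => pvP1 s a b)
          (fun s y hq => pvP1_pres s a b a' y (n * c y) hq)
          (fun s y hq => pvIncG_comm s a b a' y (m * c b) (n * c y) hq)
          S s (h b List.mem_cons_self)]
    exact ih (pvIncG s a b (m * c b)) (fun b' hb' => pvP1_pres s a b' a b (m * c b) (h b' (List.mem_cons_of_mem b hb')))

-- A's per-play nested occurrence loop, rewritten over the play's frequency table
lemma pv_perplay (xs : List Int) (s : PySem.Dict Int (PySem.Dict Int Int)) :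
    xs.foldl (fun s num => xs.foldl (fun s otro =>
        if num ≠ otro then s.modify num PySem.Dict.empty (fun cnt => cnt.modify otro 0 (· + 1)) else s) s) s
      = (PySem.Dict.counter xs).items.foldl (fun s pa => (PySem.Dict.counter xs).items.foldl (fun s pb =>
          if pa.1 ≠ pb.1 then s.modify pa.1 PySem.Dict.empty (fun c => c.modify pb.1 0 (· + pa.2 * pb.2)) else s) s) s := by
  have hstep : ∀ (a : Int) (k : Int), (fun (s : PySem.Dict Int (PySem.Dict Int Int)) (b : Int) =>
      if a ≠ b then s.modify a PySem.Dict.empty (fun c => c.modify b 0 (· + k)) else s)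
      = fun s b => pvIncG s a b k := by
    intro a k; funext s b; by_cases h : a = b <;> simp [pvIncG, pvInc, h]
  -- A's inner loop: occurrences → counted updates over the dedup
  have hinner : ∀ (a : Int) (s : PySem.Dict Int (PySem.Dict Int Int)),
      xs.foldl (fun s b => pvIncG s a b 1) s
        = (pvDedup xs).foldl (fun s b => pvIncG s a b ((xs.count b : Int))) s := by
    intro a
    exact pv_collapse (fun s b k => pvIncG s a b k) (fun s b => pvP1 s a b)
      (fun s k m n => pvIncG_merge s a k m n)
      (fun s k k' n h => pvP1_pres s a k a k' n h)
      (fun s k n => pvP1_new s a k n)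
      (fun s k k' m n h => pvIncG_comm s a k a k' m n h) xs
  -- A's outer loop: occurrences of a → count-weighted passes over the dedup
  have houter : xs.foldl (fun s a => (pvDedup xs).foldl (fun s b => pvIncG s a b (1 * (xs.count b : Int))) s) s
      = (pvDedup xs).foldl (fun s a => (pvDedup xs).foldl (fun s b => pvIncG s a b ((xs.count a : Int) * (xs.count b : Int))) s) s := by
    exact pv_collapse
      (fun s a k => (pvDedup xs).foldl (fun s b => pvIncG s a b (k * (xs.count b : Int))) s)
      (fun s a => ∀ b ∈ pvDedup xs, pvP1 s a b)
      (fun s k m n => by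
        beta_reduce
        rw [pv_pass_merge k (pvDedup xs) (fun b => m * (xs.count b : Int)) (fun b => n * (xs.count b : Int)) s]
        exact PySem.List.foldl_congr_mem _ _ _ _ (fun acc b _ => by ring_nf)
      )
      (fun s k k' n hP b hb => pv_foldl_pres _ (fun s => pvP1 s k b)
        (fun s y hq => pvP1_pres s k b k' y (n * (xs.count y : Int)) hq) (pvDedup xs) s (hP b hb))
      (fun s k n b hb => pv_pass_new k (fun b => n * (xs.count b : Int)) (pvDedup xs) s b hb)
      (fun s k k' m n hP => pv_pass_comm (pvDedup xs) (fun b => (xs.count b : Int)) k k' m n (pvDedup xs) s hP)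
      xs s
  calc xs.foldl (fun s num => xs.foldl (fun s otro =>
          if num ≠ otro then s.modify num PySem.Dict.empty (fun cnt => cnt.modify otro 0 (· + 1)) else s) s) s
      = xs.foldl (fun s a => xs.foldl (fun s b => pvIncG s a b 1) s) s := by
        apply PySem.List.foldl_congr_mem
        intro acc a _
        rw [hstep a 1]
    _ = xs.foldl (fun s a => (pvDedup xs).foldl (fun s b => pvIncG s a b (1 * (xs.count b : Int))) s) s := by
        apply PySem.List.foldl_congr_mem
        intro acc a _
        rw [hinner a acc]
        exact PySem.List.foldl_congr_mem _ _ _ _ (fun acc' b _ => by rw [one_mul])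
    _ = (pvDedup xs).foldl (fun s a => (pvDedup xs).foldl (fun s b => pvIncG s a b ((xs.count a : Int) * (xs.count b : Int))) s) s := houter
    _ = (PySem.Dict.counter xs).items.foldl (fun s pa => (PySem.Dict.counter xs).items.foldl (fun s pb =>
          if pa.1 ≠ pb.1 then s.modify pa.1 PySem.Dict.empty (fun c => c.modify pb.1 0 (· + pa.2 * pb.2)) else s) s) s := by
        rw [PySem.Dict.items_counter, pv_ofList_eq]
        rw [List.foldl_map]
        apply PySem.List.foldl_congr_mem
        intro acc a _
        rw [List.foldl_map]
        apply PySem.List.foldl_congr_mem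
        intro acc' b _
        by_cases h : a = b <;> simp [pvIncG, pvInc, h]

-- folding a flattened list = folding each chunk in turn
lemma pv_foldl_flatMap {σ α β : Type} (g : α → List β) (f : σ → β → σ) :
    ∀ (l : List α) (s : σ), (l.flatMap g).foldl f s = l.foldl (fun s x => (g x).foldl f s) s := by
  intro l
  induction l with
  | nil => intro s; rfl
  | cons x r ih =>
    intro s
    simp only [List.flatMap_cons, List.foldl_append, List.foldl_cons, ih]

-- summing one play's contribution triples = the nested frequency-table fold
lemma pv_contrib_fold (cnt : PySem.Dict Int Int) (s : PySem.Dict Int (PySem.Dict Int Int)) :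
    (cnt.items.flatMap (fun pa =>
        (cnt.items.filter (fun pb => pa.1 != pb.1)).map (fun pb => (pa.1, pb.1, pa.2 * pb.2)))).foldl
      (fun cooc (t : Int × Int × Int) =>
        cooc.modify t.1 PySem.Dict.empty (fun c => c.modify t.2.1 0 (· + t.2.2))) s
      = cnt.items.foldl (fun s pa => cnt.items.foldl (fun s pb =>
          if pa.1 ≠ pb.1 then s.modify pa.1 PySem.Dict.empty (fun c => c.modify pb.1 0 (· + pa.2 * pb.2)) else s) s) s := by
  rw [pv_foldl_flatMap]
  apply PySem.List.foldl_congr_mem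
  intro acc pa _
  rw [List.foldl_map, ← PySem.List.foldl_if_eq_foldl_filter]
  apply PySem.List.foldl_congr_mem
  intro acc' pb _
  by_cases h : pa.1 = pb.1 <;> simp [h]

-- ===== VERDICT (by name: the statement is the Claim_ definition above) =====
theorem analizar_coocurrencias_spec : Claim_equal_analizar_coocurrencias := by
  intro resultados _
  unfold Spec_analizar_coocurrencias
  simp only [analizar_coocurrencias, analizar_coocurrencias_alt, pvAportes]
  rw [pv_foldl_flatMap]
  rw [PySem.List.foldl_congr_mem resultados _ _ PySem.Dict.empty
        (fun acc j _ => pv_perplay (PySem.List.slice j none (some (-1))) acc),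
      PySem.List.foldl_congr_mem resultados _ _ PySem.Dict.empty
        (fun acc j _ => pv_contrib_fold (PySem.Dict.counter (PySem.List.slice j none (some (-1)))) acc)]
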